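-- pv_equiv track=rewrite | github.com/thob97/uni_fu_alp3_algorithmen-datenstrukturen-und-datenabstraktion | u9/a59_fach.py | f
-- ===== SOURCE A (Python) =====
-- def f(t):
--     faecher = [0 for i in range(0,1024)]
--
--     for i in range(0,1024):
--         faecher[(t*i)%1024] +=1
--
--     max = faecher[0]
--     for x in faecher:
--         if (x>max): max=x
--
--     return max
-- ===== SOURCE B (Python) =====
-- def f(t):
--     # The histogram buckets are cosets of a subgroup, so every non-empty bucket
--     # has the same size as the zero bucket, which is never empty (the first loop
--     # index lands there). Hence the maximum bucket count is the zero bucket's size.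
--     return sum(1 for i in range(1024) if (t * i) % 1024 == 0)
-- ===== Notes on version B (the rewrite author's own statement) =====
-- stated objective: simpler
-- what changed: B computes no histogram at all: every non-empty residue bucket is a coset of the same subgroup and hence has the size of the zero bucket (never empty, as the first loop index lands there), so B returns the count of loop indices landing in the zero bucket in a single counting pass, with no array and no max scan.
import Mathlib
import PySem

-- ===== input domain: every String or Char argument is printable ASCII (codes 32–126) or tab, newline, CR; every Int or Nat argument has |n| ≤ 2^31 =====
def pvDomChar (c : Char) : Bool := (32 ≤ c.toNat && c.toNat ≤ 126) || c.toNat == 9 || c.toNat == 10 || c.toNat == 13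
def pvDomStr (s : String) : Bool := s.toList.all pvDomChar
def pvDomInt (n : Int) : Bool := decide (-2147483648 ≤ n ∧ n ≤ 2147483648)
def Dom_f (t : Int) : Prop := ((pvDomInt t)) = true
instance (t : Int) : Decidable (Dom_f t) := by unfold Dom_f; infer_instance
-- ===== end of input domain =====

set_option maxRecDepth 8192

-- B replaces A's histogram-and-max-scan by a single counting pass over bucket 0
-- (every non-empty bucket is a coset of a subgroup, so bucket 0 is maximal): simpler.


-- ===== PORT A =====
-- faecher[(t*i)%1024] += 1 is ported with the total forms pyGetD/pySetD: the index
-- (t*i) % 1024 always lies in [0, 1024), the range of valid indices, so they are exact.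
def f (t : Int) : Int :=
  let faecher : List Int := (PySem.List.pyRange 0 1024 1).map (fun _ => 0)
  let faecher := (PySem.List.pyRange 0 1024 1).foldl
    (fun l i =>
      PySem.List.pySetD l (PySem.Int.mod (t * i) 1024)
        (PySem.List.pyGetD l (PySem.Int.mod (t * i) 1024) 0 + 1)) faecher
  let m := PySem.List.pyGetD faecher 0 0
  faecher.foldl (fun m x => if x > m then x else m) m

-- ===== PORT B =====
-- sum(1 for i in range(1024) if (t * i) % 1024 == 0)
def f_alt (t : Int) : Int :=
  (PySem.List.pyRange 0 1024 1).foldl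
    (fun acc i => if PySem.Int.mod (t * i) 1024 == 0 then acc + 1 else acc) 0

-- ===== PRECONDITION & SPEC =====
def Spec_f (t : Int) (out : Int) : Prop := out = f_alt t
instance (t : Int) (out : Int) : Decidable (Spec_f t out) := by unfold Spec_f; infer_instance

-- ===== CLAIM (what is proved, stated in full; the proofs are below) =====
def Claim_equal_f : Prop := ∀ (t : Int), Dom_f t → Spec_f t (f t)

-- ===== LEMMAS AND PROOFS =====

-- the bucket index of loop iteration i, as a Nat
def pvKey (t i : Int) : Nat := ((t * i) % 1024).toNat

-- the count of loop indices landing in bucket c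
def pvCnt (t : Int) (c : Nat) : Nat :=
  (PySem.List.pyRange 0 1024 1).countP (fun i => pvKey t i == c)

-- generalized key (symbolic modulus, to keep literal 1024 out of the coset argument)
def pvKeyN (t : Int) (n : Nat) (i : Int) : Nat := ((t * i) % (n : Int)).toNat

lemma pvKeyN_eq_iff (t : Int) (n : Nat) (hn : 0 < n) (i : Int) (c : Nat) :
    (pvKeyN t n i = c) ↔ (t * i) % (n : Int) = (c : Int) := by
  have h1 := Int.emod_nonneg (t*i) (by exact_mod_cast hn.ne' : ((n:Int)) ≠ 0)
  unfold pvKeyN; omega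

-- the coset argument: bucket c is never more populated than bucket 0
lemma cardN_le (t : Int) (n c : Nat) (hn : 0 < n) :
    ((Finset.range n).filter (fun k : Nat => pvKeyN t n (k : Int) == c)).card
      ≤ ((Finset.range n).filter (fun k : Nat => pvKeyN t n (k : Int) == 0)).card := by
  have hnz : ((n:Int)) ≠ 0 := by exact_mod_cast hn.ne'
  have hpos : (0:Int) < (n:Int) := by exact_mod_cast hn
  by_cases hne : ((Finset.range n).filter (fun k : Nat => pvKeyN t n (k : Int) == c)) = ∅
  · rw [hne]; simp
  · obtain ⟨i0, hi0⟩ := Finset.nonempty_iff_ne_empty.mpr hne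
    simp only [Finset.mem_filter, Finset.mem_range, beq_iff_eq] at hi0
    obtain ⟨hi0lt, hi0key⟩ := hi0
    have hi0k : (t * (i0:Int)) % n = (c : Int) := (pvKeyN_eq_iff t n hn _ c).mp hi0key
    refine Finset.card_le_card_of_injOn (fun k => (((k:Int) - (i0:Int)) % n).toNat) ?_ ?_
    · intro k hk
      simp only [Finset.coe_filter, Finset.mem_range, Set.mem_setOf_eq, beq_iff_eq] at hk ⊢
      obtain ⟨hklt, hkkey⟩ := hk
      have hkk : (t * (k:Int)) % n = (c : Int) := (pvKeyN_eq_iff t n hn _ c).mp hkkey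
      have hm0 : (0:Int) ≤ ((k:Int) - (i0:Int)) % n := Int.emod_nonneg _ hnz
      have hmlt : ((k:Int) - (i0:Int)) % n < n := Int.emod_lt_of_pos _ hpos
      refine ⟨by omega, ?_⟩
      rw [pvKeyN_eq_iff t n hn]
      have hcast : ((((k:Int) - (i0:Int)) % n).toNat : Int) = ((k:Int) - (i0:Int)) % n := by omega
      rw [hcast]
      calc t * (((k:Int) - (i0:Int)) % n) % n
          = (t % n) * ((((k:Int) - (i0:Int)) % n) % n) % n := by rw [Int.mul_emod]
        _ = (t % n) * (((k:Int) - (i0:Int)) % n) % n := by rw [Int.emod_emod_of_dvd _ (dvd_refl _)]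
        _ = t * ((k:Int) - (i0:Int)) % n := by rw [← Int.mul_emod]
        _ = (t * k - t * i0) % n := by ring_nf
        _ = ((t * k) % n - (t * i0) % n) % n := by rw [Int.sub_emod]
        _ = 0 := by rw [hkk, hi0k]; simp
    · intro k hk k' hk' heq
      simp only [Finset.coe_filter, Finset.mem_range, Set.mem_setOf_eq] at hk hk'
      have hm0 : (0:Int) ≤ ((k:Int) - (i0:Int)) % n := Int.emod_nonneg _ hnz
      have hm0' : (0:Int) ≤ ((k':Int) - (i0:Int)) % n := Int.emod_nonneg _ hnz
      have h1 : ((k:Int) - (i0:Int)) % n = ((k':Int) - (i0:Int)) % n := by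
        simp only at heq
        omega
      have hmod : ((k:Int) - (i0:Int)) ≡ ((k':Int) - (i0:Int)) [ZMOD (n:Int)] := h1
      have h2 : ((k:Int)) % n = ((k':Int)) % n := by
        have h3 := hmod.add_right (i0:Int)
        simp only [sub_add_cancel] at h3
        exact h3
      have hk1 : (k:Int) < n := by exact_mod_cast hk.1
      have hk2 : (k':Int) < n := by exact_mod_cast hk'.1
      have e1 : (k:Int) % n = (k:Int) := Int.emod_eq_of_lt (by positivity) hk1
      have e2 : (k':Int) % n = (k':Int) := Int.emod_eq_of_lt (by positivity) hk2
      have : (k:Int) = (k':Int) := by rw [← e1, ← e2, h2]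
      exact_mod_cast this

lemma pvCnt_eq (t : Int) (c : Nat) :
    pvCnt t c = ((Finset.range 1024).filter (fun k : Nat => pvKey t (k : Int) == c)).card := by
  unfold pvCnt
  rw [PySem.List.pyRange_one, List.countP_map]
  simp only [Finset.card, Finset.filter, Finset.range_val, Multiset.range, Multiset.filter_coe,
    Bool.decide_eq_true, Multiset.coe_card, List.countP_eq_length_filter]
  norm_num
  rw [show Int.toNat 1024 = 1024 from rfl]
  congr 1

lemma cnt_le_cnt_zero (t : Int) (c : Nat) : pvCnt t c ≤ pvCnt t 0 := by
  rw [pvCnt_eq, pvCnt_eq]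
  have hkk : ∀ i : Int, pvKeyN t 1024 i = pvKey t i := by
    intro i; norm_num [pvKey, pvKeyN]
  have h := cardN_le t 1024 c (by norm_num)
  simpa only [hkk] using h

lemma getD_set_bump (l : List Int) (j c : Nat) (hj : j < l.length) :
    (l.set j (l[j] + 1)).getD c 0 = if j = c then l.getD c 0 + 1 else l.getD c 0 := by
  simp only [List.getD, List.getElem?_set, hj, if_true]
  by_cases h : j = c
  · subst h
    simp [List.getElem?_eq_getElem hj]
  · simp [h]

-- invariant of A's histogram loop
lemma hist_invariant (t : Int) (is : List Int) (l : List Int) (hl : l.length = 1024)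
    (c : Nat) :
    ((is.foldl
      (fun l i =>
        PySem.List.pySetD l (PySem.Int.mod (t * i) 1024)
          (PySem.List.pyGetD l (PySem.Int.mod (t * i) 1024) 0 + 1)) l).getD c 0)
      = l.getD c 0 + (is.countP (fun i => pvKey t i == c) : Int) := by
  induction is generalizing l with
  | nil => simp
  | cons i is ih =>
    have hk0 : (0:Int) ≤ PySem.Int.mod (t * i) 1024 := PySem.Int.mod_nonneg _ (by norm_num)
    have hklt : PySem.Int.mod (t * i) 1024 < 1024 := PySem.Int.mod_lt _ (by norm_num)
    have hkey : (PySem.Int.mod (t * i) 1024).toNat = pvKey t i := by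
      rw [PySem.Int.mod_eq_emod_of_pos (by norm_num)]; rfl
    rw [List.foldl_cons, ih _ (by rw [PySem.List.length_pySetD, hl])]
    rw [PySem.List.pySetD_of_nonneg l _ hk0,
        PySem.List.pyGetD_eq_getElem l 0 hk0 (by rw [hl]; exact_mod_cast hklt)]
    rw [getD_set_bump l _ c (by omega), List.countP_cons, hkey]
    by_cases hec : pvKey t i = c
    · simp [hec]; ring
    · simp [hec]

lemma hist_length (t : Int) (is : List Int) (l : List Int) :
    ((is.foldl
      (fun l i =>
        PySem.List.pySetD l (PySem.Int.mod (t * i) 1024)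
          (PySem.List.pyGetD l (PySem.Int.mod (t * i) 1024) 0 + 1)) l).length)
      = l.length := by
  induction is generalizing l with
  | nil => rfl
  | cons i is ih => rw [List.foldl_cons, ih, PySem.List.length_pySetD]

lemma f_alt_eq_cnt_zero (t : Int) : f_alt t = (pvCnt t 0 : Int) := by
  unfold f_alt
  rw [PySem.List.foldl_count_if (fun i => PySem.Int.mod (t * i) 1024 == 0) _ 0, zero_add]
  unfold pvCnt
  congr 1
  apply List.countP_congr
  intro i _
  have hk0 : (0:Int) ≤ PySem.Int.mod (t * i) 1024 := PySem.Int.mod_nonneg _ (by norm_num)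
  rw [PySem.Int.mod_eq_emod_of_pos (by norm_num)] at *
  simp only [beq_iff_eq]
  unfold pvKey
  omega

-- ===== VERDICT (by name: the statement is the Claim_ definition above) =====
theorem f_spec : Claim_equal_f := by
  unfold Claim_equal_f Spec_f
  intro t _
  show (let faecher : List Int := (PySem.List.pyRange 0 1024 1).map (fun _ => 0)
    let faecher := (PySem.List.pyRange 0 1024 1).foldl
      (fun l i =>
        PySem.List.pySetD l (PySem.Int.mod (t * i) 1024)
          (PySem.List.pyGetD l (PySem.Int.mod (t * i) 1024) 0 + 1)) faecher
    let m := PySem.List.pyGetD faecher 0 0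
    faecher.foldl (fun m x => if x > m then x else m) m) = f_alt t
  simp only []
  set L0 : List Int := (PySem.List.pyRange 0 1024 1).map (fun _ => 0) with hL0
  have hL0len : L0.length = 1024 := by
    rw [hL0, List.length_map, PySem.List.length_pyRange_one]; rfl
  have hL0getD : ∀ c : Nat, L0.getD c 0 = 0 := by
    intro c
    rw [hL0]
    rw [List.getD, List.getElem?_map]
    cases (PySem.List.pyRange 0 1024 1)[c]? <;> rfl
  set H : List Int := (PySem.List.pyRange 0 1024 1).foldl
      (fun l i =>
        PySem.List.pySetD l (PySem.Int.mod (t * i) 1024)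
          (PySem.List.pyGetD l (PySem.Int.mod (t * i) 1024) 0 + 1)) L0 with hH
  have hHlen : H.length = 1024 := by rw [hH, hist_length, hL0len]
  have hHgetD : ∀ c : Nat, c < 1024 → H.getD c 0 = (pvCnt t c : Int) := by
    intro c hc
    rw [hH, hist_invariant t _ L0 hL0len c, hL0getD, zero_add]
    rfl
  have hm : PySem.List.pyGetD H 0 0 = (pvCnt t 0 : Int) := by
    rw [PySem.List.pyGetD_zero, hHgetD 0 (by norm_num)]
  have hmax : (fun (m x : Int) => if x > m then x else m) = (max : Int → Int → Int) := by
    funext m x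
    by_cases h : x > m
    · rw [if_pos h, max_eq_right (le_of_lt h)]
    · rw [if_neg h, max_eq_left (not_lt.1 h)]
  rw [hmax, hm]
  have hmem : ∀ y ∈ H, y ≤ (pvCnt t 0 : Int) := by
    intro y hy
    obtain ⟨i, hi, hiy⟩ := List.mem_iff_getElem.mp hy
    have : H.getD i 0 = y := by rw [List.getD_eq_getElem H 0 hi, hiy]
    rw [← this, hHgetD i (by omega)]
    exact_mod_cast cnt_le_cnt_zero t i
  have hub := (PySem.List.le_foldl_max H ((pvCnt t 0 : Int))).1
  rcases PySem.List.foldl_max_mem H ((pvCnt t 0 : Int)) with hcase | hcase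
  · rw [hcase, f_alt_eq_cnt_zero]
  · have hle := hmem _ hcase
    rw [f_alt_eq_cnt_zero]
    omega
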